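-- pv_equiv track=rewrite | github.com/rimuhamu/ledger-lens | src/geopolitical_service.py | _consolidate_risks
-- ===== SOURCE A (Python) =====
-- from typing import Dict, List
--
-- def _consolidate_risks(risks: List[Dict]):
--     """
--     Deduplicate and consolidate risks from multiple sources.
--     """
--     if not risks:
--         return []
--
--     # Group by risk name
--     consolidated = {}
--     for risk in risks:
--         name = risk["name"]
--         if name not in consolidated:
--             consolidated[name] = risk
--         else:
--             # Keep the higher severity
--             existing_severity = consolidated[name]["severity"]
--             new_severity = risk["severity"]
--
--             severity_order = {"LOW": 1, "MED": 2, "HIGH": 3}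
--             if severity_order.get(new_severity, 0) > severity_order.get(existing_severity, 0):
--                 consolidated[name] = risk
--
--     # Sort by severity (HIGH -> MED -> LOW)
--     severity_order = {"HIGH": 0, "MED": 1, "LOW": 2}
--     sorted_risks = sorted(
--         consolidated.values(),
--         key=lambda x: severity_order.get(x["severity"], 3)
--     )
--
--     return sorted_risks[:4]  # Return top 4 risks
-- ===== SOURCE B (Python) =====
-- from typing import Dict, List
--
-- def _consolidate_risks(risks: List[Dict]):
--     """
--     Deduplicate and consolidate risks from multiple sources.
--     Bucket pass (HIGH/MED/LOW/other) instead of a sort: same result, one linear pass.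
--     """
--     if not risks:
--         return []
--
--     # Group by risk name (same dedup rule: keep the higher severity, first wins ties)
--     consolidated = {}
--     for risk in risks:
--         name = risk["name"]
--         if name not in consolidated:
--             consolidated[name] = risk
--         else:
--             existing_severity = consolidated[name]["severity"]
--             new_severity = risk["severity"]
--             severity_order = {"LOW": 1, "MED": 2, "HIGH": 3}
--             if severity_order.get(new_severity, 0) > severity_order.get(existing_severity, 0):
--                 consolidated[name] = risk
--
--     # Bucket by severity instead of sorting: insertion order inside each bucket
--     # is first-seen order, exactly what the stable sort produced.
--     high, med, low, other = [], [], [], []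
--     buckets = {"HIGH": high, "MED": med, "LOW": low}
--     for r in consolidated.values():
--         buckets.get(r["severity"], other).append(r)
--
--     return (high + med + low + other)[:4]
-- ===== Notes on version B (the rewrite author's own statement) =====
-- stated objective: alternative
-- what changed: The sort+slice over consolidated risks is replaced by a single bucket pass (HIGH/MED/LOW/other lists appended in order, concatenated, first 4 taken); the grouping phase is unchanged.
import Mathlib
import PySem

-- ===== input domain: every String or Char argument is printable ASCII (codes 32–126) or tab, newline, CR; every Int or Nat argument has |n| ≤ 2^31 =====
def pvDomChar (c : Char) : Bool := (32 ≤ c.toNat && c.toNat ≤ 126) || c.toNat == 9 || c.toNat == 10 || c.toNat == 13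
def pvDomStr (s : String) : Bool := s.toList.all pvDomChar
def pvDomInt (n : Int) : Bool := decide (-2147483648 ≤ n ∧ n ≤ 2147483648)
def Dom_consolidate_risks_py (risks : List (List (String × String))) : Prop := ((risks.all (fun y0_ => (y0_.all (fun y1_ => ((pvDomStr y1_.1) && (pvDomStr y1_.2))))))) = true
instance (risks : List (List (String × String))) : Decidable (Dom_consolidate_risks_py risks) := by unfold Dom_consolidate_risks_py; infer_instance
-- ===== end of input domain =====

-- B replaces the sort+slice over the consolidated risks with a linear bucket pass (HIGH/MED/LOW/other); the grouping phase is unchanged.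
-- (No mutation of the argument; equivalence is about the return value.)


-- ===== PORT A =====
-- risk["severity"] / risk["name"]: the KeyError inputs are excluded by Pre_, so the total getD form is exact there.
def pvSev (r : List (String × String)) : String := (PySem.Dict.mk r).getD "severity" ""

def pvName (r : List (String × String)) : String := (PySem.Dict.mk r).getD "name" ""

-- severity_order = {"LOW": 1, "MED": 2, "HIGH": 3}
def pvSevUp : PySem.Dict String Int := PySem.Dict.mk [("LOW", 1), ("MED", 2), ("HIGH", 3)]

-- severity_order = {"HIGH": 0, "MED": 1, "LOW": 2}
def pvSevDown : PySem.Dict String Int := PySem.Dict.mk [("HIGH", 0), ("MED", 1), ("LOW", 2)]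

-- the sort key: lambda x: severity_order.get(x["severity"], 3)
def pvKey (r : List (String × String)) : Int := pvSevDown.getD (pvSev r) 3

-- the grouping loop over `risks`, textually identical in A and in B (Source B keeps it unchanged)
def pvGroup (risks : List (List (String × String))) : PySem.Dict String (List (String × String)) :=
  risks.foldl (fun consolidated risk =>
    let name := pvName risk
    if consolidated.contains name = false then
      consolidated.insert name risk
    else
      let existing_severity := pvSev (consolidated.getD name [])
      let new_severity := pvSev risk
      if pvSevUp.getD existing_severity 0 < pvSevUp.getD new_severity 0 then
        consolidated.insert name risk
      else consolidated) PySem.Dict.empty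

def consolidate_risks_py (risks : List (List (String × String))) : List (List (String × String)) :=
  if risks = [] then []
  else
    let sorted_risks := PySem.List.sorted (pvGroup risks).values (fun x => pvKey x) false
    PySem.List.slice sorted_risks none (some 4)   -- sorted_risks[:4]

-- ===== PORT B =====
-- buckets.get(r["severity"], other).append(r): dispatch on the three literal keys, else append to `other`.
def consolidate_risks_py_alt (risks : List (List (String × String))) : List (List (String × String)) :=
  if risks = [] then []
  else
    let b := (pvGroup risks).values.foldl
      (fun (b : List (List (String × String)) × List (List (String × String)) ×
                List (List (String × String)) × List (List (String × String))) r =>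
        let s := pvSev r
        if s == "HIGH" then (b.1 ++ [r], b.2.1, b.2.2.1, b.2.2.2)
        else if s == "MED" then (b.1, b.2.1 ++ [r], b.2.2.1, b.2.2.2)
        else if s == "LOW" then (b.1, b.2.1, b.2.2.1 ++ [r], b.2.2.2)
        else (b.1, b.2.1, b.2.2.1, b.2.2.2 ++ [r]))
      ([], [], [], [])
    (b.1 ++ b.2.1 ++ b.2.2.1 ++ b.2.2.2).take 4   -- (high + med + low + other)[:4]

-- ===== PRECONDITION & SPEC =====
-- Pre_ excludes exactly the inputs on which A raises KeyError: a risk dict missing "name" or "severity".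
def Pre_consolidate_risks_py (risks : List (List (String × String))) : Prop :=
  ∀ r ∈ risks, (PySem.Dict.mk r).contains "name" = true ∧ (PySem.Dict.mk r).contains "severity" = true
instance (risks : List (List (String × String))) : Decidable (Pre_consolidate_risks_py risks) := by unfold Pre_consolidate_risks_py; infer_instance

def pvWitness_consolidate_risks_py : (List (List (String × String))) :=
  [[("name", "a"), ("severity", "HIGH")], [("name", "b"), ("severity", "LOW")]]

def Spec_consolidate_risks_py (risks : List (List (String × String))) (out : List (List (String × String))) : Prop := out = consolidate_risks_py_alt risks
instance (risks : List (List (String × String))) (out : List (List (String × String))) : Decidable (Spec_consolidate_risks_py risks out) := by unfold Spec_consolidate_risks_py; infer_instance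

-- ===== CLAIM (what is proved, stated in full; the proofs are below) =====
def Claim_equal_consolidate_risks_py : Prop := ∀ (risks : List (List (String × String))), Dom_consolidate_risks_py risks → Pre_consolidate_risks_py risks → Spec_consolidate_risks_py risks (consolidate_risks_py risks)

-- ===== LEMMAS AND PROOFS =====

-- the four severity classes of a consolidated risk (Bool predicates used by the proofs only)
def pvH (r : List (String × String)) : Bool := pvSev r == "HIGH"
def pvM (r : List (String × String)) : Bool := pvSev r == "MED"
def pvL (r : List (String × String)) : Bool := pvSev r == "LOW"
def pvO (r : List (String × String)) : Bool := !(pvH r || pvM r || pvL r)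

lemma key_of_H {r} (h : pvH r = true) : pvKey r = 0 := by
  have hs : pvSev r = "HIGH" := by simpa [pvH] using h
  simp [pvKey, pvSevDown, hs, PySem.Dict.getD_eq_get?_getD, PySem.Dict.get?_mk_cons]

lemma key_of_M {r} (h : pvM r = true) : pvKey r = 1 := by
  have hs : pvSev r = "MED" := by simpa [pvM] using h
  simp [pvKey, pvSevDown, hs, PySem.Dict.getD_eq_get?_getD, PySem.Dict.get?_mk_cons]

lemma key_of_L {r} (h : pvL r = true) : pvKey r = 2 := by
  have hs : pvSev r = "LOW" := by simpa [pvL] using h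
  simp [pvKey, pvSevDown, hs, PySem.Dict.getD_eq_get?_getD, PySem.Dict.get?_mk_cons]

lemma key_of_O {r} (h : pvO r = true) : pvKey r = 3 := by
  simp only [pvO, pvH, pvM, pvL, Bool.not_eq_true', Bool.or_eq_false_iff, beq_eq_false_iff_ne] at h
  simp [pvKey, pvSevDown, PySem.Dict.getD_eq_get?_getD,
    Ne.symm h.1.1, Ne.symm h.1.2, Ne.symm h.2, PySem.Dict.get?]

lemma insertBy_middle {α : Type} (before : α → α → Bool) (x : α) (pre post : List α)
    (hpre : ∀ y ∈ pre, before x y = false) (hpost : ∀ y ∈ post, before x y = true) :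
    PySem.List.insertBy before x (pre ++ post) = pre ++ x :: post := by
  induction pre with
  | nil =>
    cases post with
    | nil => rfl
    | cons y ys => simp [PySem.List.insertBy, hpost y (by simp)]
  | cons z zs ih =>
    simp only [List.cons_append, PySem.List.insertBy, hpre z (by simp), Bool.false_eq_true, if_false]
    rw [ih (fun y hy => hpre y (by simp [hy]))]

lemma sorted_eq_buckets (vals : List (List (String × String))) :
    PySem.List.sorted vals (fun x => pvKey x) false =
      vals.filter pvH ++ vals.filter pvM ++ vals.filter pvL ++ vals.filter pvO := by
  rw [PySem.List.sorted_eq_foldl_insertBy]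
  induction vals using List.reverseRecOn with
  | nil => rfl
  | append_singleton vs x ih =>
    rw [List.foldl_append, List.foldl_cons, List.foldl_nil, ih]
    have mH : ∀ y ∈ vs.filter pvH, pvKey y = 0 := fun y hy => key_of_H (List.mem_filter.mp hy).2
    have mM : ∀ y ∈ vs.filter pvM, pvKey y = 1 := fun y hy => key_of_M (List.mem_filter.mp hy).2
    have mL : ∀ y ∈ vs.filter pvL, pvKey y = 2 := fun y hy => key_of_L (List.mem_filter.mp hy).2
    have mO : ∀ y ∈ vs.filter pvO, pvKey y = 3 := fun y hy => key_of_O (List.mem_filter.mp hy).2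
    by_cases h1 : pvH x
    · have hsx : pvSev x = "HIGH" := by simpa [pvH] using h1
      have hx := key_of_H h1
      rw [show vs.filter pvH ++ vs.filter pvM ++ vs.filter pvL ++ vs.filter pvO
            = vs.filter pvH ++ (vs.filter pvM ++ vs.filter pvL ++ vs.filter pvO) by simp,
          insertBy_middle _ x _ _
            (fun y hy => by simp [hx, mH y hy])
            (fun y hy => by
              simp only [List.mem_append] at hy
              rcases hy with (hy | hy) | hy
              · simp [hx, mM y hy]
              · simp [hx, mL y hy]
              · simp [hx, mO y hy])]
      simp [List.filter_append, pvH, pvM, pvL, pvO, hsx, List.append_assoc]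
    · by_cases h2 : pvM x
      · have hsx : pvSev x = "MED" := by simpa [pvM] using h2
        have hx := key_of_M h2
        rw [show vs.filter pvH ++ vs.filter pvM ++ vs.filter pvL ++ vs.filter pvO
              = (vs.filter pvH ++ vs.filter pvM) ++ (vs.filter pvL ++ vs.filter pvO) by simp,
            insertBy_middle _ x _ _
              (fun y hy => by
                simp only [List.mem_append] at hy
                rcases hy with hy | hy
                · simp [hx, mH y hy]
                · simp [hx, mM y hy])
              (fun y hy => by
                simp only [List.mem_append] at hy
                rcases hy with hy | hy
                · simp [hx, mL y hy]
                · simp [hx, mO y hy])]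
        simp [List.filter_append, pvH, pvM, pvL, pvO, hsx, List.append_assoc]
      · by_cases h3 : pvL x
        · have hsx : pvSev x = "LOW" := by simpa [pvL] using h3
          have hx := key_of_L h3
          rw [show vs.filter pvH ++ vs.filter pvM ++ vs.filter pvL ++ vs.filter pvO
                = (vs.filter pvH ++ vs.filter pvM ++ vs.filter pvL) ++ vs.filter pvO by simp,
              insertBy_middle _ x _ _
                (fun y hy => by
                  simp only [List.mem_append] at hy
                  rcases hy with (hy | hy) | hy
                  · simp [hx, mH y hy]
                  · simp [hx, mM y hy]
                  · simp [hx, mL y hy])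
                (fun y hy => by simp [hx, mO y hy])]
          simp [List.filter_append, pvH, pvM, pvL, pvO, hsx, List.append_assoc]
        · have hx : pvKey x = 3 := key_of_O (by simp [pvO, h1, h2, h3])
          rw [show vs.filter pvH ++ vs.filter pvM ++ vs.filter pvL ++ vs.filter pvO
                = (vs.filter pvH ++ vs.filter pvM ++ vs.filter pvL ++ vs.filter pvO) ++ [] by simp,
              insertBy_middle _ x _ _
                (fun y hy => by
                  simp only [List.mem_append] at hy
                  rcases hy with ((hy | hy) | hy) | hy
                  · simp [hx, mH y hy]
                  · simp [hx, mM y hy]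
                  · simp [hx, mL y hy]
                  · simp [hx, mO y hy])
                (fun y hy => by simp at hy)]
          simp [List.filter_append, pvO, h1, h2, h3, List.append_assoc]

lemma bucket_foldl (vals : List (List (String × String)))
    (h m l o : List (List (String × String))) :
    vals.foldl
      (fun (b : List (List (String × String)) × List (List (String × String)) ×
                List (List (String × String)) × List (List (String × String))) r =>
        let s := pvSev r
        if s == "HIGH" then (b.1 ++ [r], b.2.1, b.2.2.1, b.2.2.2)
        else if s == "MED" then (b.1, b.2.1 ++ [r], b.2.2.1, b.2.2.2)
        else if s == "LOW" then (b.1, b.2.1, b.2.2.1 ++ [r], b.2.2.2)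
        else (b.1, b.2.1, b.2.2.1, b.2.2.2 ++ [r])) (h, m, l, o)
    = (h ++ vals.filter pvH, m ++ vals.filter pvM, l ++ vals.filter pvL, o ++ vals.filter pvO) := by
  induction vals generalizing h m l o with
  | nil => simp
  | cons a t ih =>
    rw [List.foldl_cons]
    simp only [beq_iff_eq] at ih ⊢
    by_cases h1 : pvSev a = "HIGH"
    · rw [if_pos h1, ih]
      simp [pvH, pvM, pvL, pvO, h1]
    · rw [if_neg h1]
      by_cases h2 : pvSev a = "MED"
      · rw [if_pos h2, ih]
        simp [pvH, pvM, pvL, pvO, h2]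
      · rw [if_neg h2]
        by_cases h3 : pvSev a = "LOW"
        · rw [if_pos h3, ih]
          simp [pvH, pvM, pvL, pvO, h3]
        · rw [if_neg h3, ih]
          simp [pvH, pvM, pvL, pvO, h1, h2, h3]

-- ===== VERDICT (by name: the statement is the Claim_ definition above) =====
theorem consolidate_risks_py_spec : Claim_equal_consolidate_risks_py := by
  intro risks _ _
  unfold Spec_consolidate_risks_py consolidate_risks_py consolidate_risks_py_alt
  by_cases h : risks = []
  · simp [h]
  · simp only [h, if_false]
    rw [show (4:Int) = ((4:Nat):Int) from rfl, PySem.List.slice_to_natCast, sorted_eq_buckets, bucket_foldl]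
    simp [List.append_assoc]
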